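-- pv_equiv track=rewrite | github.com/StepanErshov/Cpp_School21_DS | Visual Studio Code/C_and_Cpp/laba_mkp_graph/max_min.py | find_max_fives
-- ===== SOURCE A (Python) =====
-- def find_max_fives(grades):
--     # Переменные для подсчета количества пятерок и текущей позиции
--     max_fives = 0
--     current_position = 0
--
--     # Проходим по всем оценкам
--     for i in range(len(grades)):
--         if grades[i] == 5:
--             # Если оценка - пятерка, увеличиваем счетчик
--             max_fives += 1
--         elif grades[i] == 2 or grades[i] == 3:
--             # Если оценка - двойка или тройка, начинаем новый подсчет
--             current_position = i + 1
--             max_fives = 0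
--
--     # Возвращаем максимальное количество пятерок
--     return max_fives
-- ===== SOURCE B (Python) =====
-- def find_max_fives(grades):
--     # Pass 1: index of the last grade equal to 2 or 3 (-1 if none).
--     last = -1
--     for i, g in enumerate(grades):
--         if g == 2 or g == 3:
--             last = i
--     # Pass 2: count the fives in the suffix after that index.
--     return sum(1 for g in grades[last + 1:] if g == 5)
-- ===== Notes on version B (the rewrite author's own statement) =====
-- stated objective: alternative
-- what changed: Replaces the single stateful loop (running counter reset on 2/3) by a two-pass decomposition: find the index of the last grade equal to 2 or 3, then count the 5s in the suffix after it.
import Mathlib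
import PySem

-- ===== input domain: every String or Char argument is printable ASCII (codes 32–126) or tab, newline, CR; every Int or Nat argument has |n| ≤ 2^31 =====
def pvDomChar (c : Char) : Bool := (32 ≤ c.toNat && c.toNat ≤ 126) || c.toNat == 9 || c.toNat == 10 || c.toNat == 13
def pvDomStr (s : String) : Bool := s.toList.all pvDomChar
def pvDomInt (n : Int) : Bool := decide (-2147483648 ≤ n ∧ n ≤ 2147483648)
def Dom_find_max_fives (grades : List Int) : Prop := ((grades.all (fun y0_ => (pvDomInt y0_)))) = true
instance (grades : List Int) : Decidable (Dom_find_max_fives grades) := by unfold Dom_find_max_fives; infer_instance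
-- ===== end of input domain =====

-- B replaces A's single stateful loop (counter reset on 2/3) by a two-pass decomposition:
-- find the last index holding a 2 or 3, then count the 5s in the suffix after it. Objective: alternative.

-- ===== PORT A =====
-- state = (max_fives, current_position); loop 'for i in range(len(grades))', indexing always in range
def find_max_fives (grades : List Int) : Int :=
  ((List.range grades.length).foldl
    (fun (st : Int × Int) (i : Nat) =>
      if grades.getD i 0 = 5 then (st.1 + 1, st.2)
      else if grades.getD i 0 = 2 ∨ grades.getD i 0 = 3 then (0, (i : Int) + 1)
      else st) ((0 : Int), (0 : Int))).1

-- ===== PORT B =====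
-- pass 1 of Source B: index of the last grade equal to 2 or 3, -1 if none
def lastReset (grades : List Int) : Int :=
  grades.zipIdx.foldl (fun acc p => if p.1 = 2 ∨ p.1 = 3 then (p.2 : Int) else acc) (-1)

-- pass 2 of Source B: count the 5s in grades[last+1:]
def find_max_fives_alt (grades : List Int) : Int :=
  (((grades.drop ((lastReset grades) + 1).toNat).countP (fun g => g == 5) : Nat) : Int)

-- ===== PRECONDITION & SPEC =====
def Spec_find_max_fives (grades : List Int) (out : Int) : Prop := out = find_max_fives_alt grades
instance (grades : List Int) (out : Int) : Decidable (Spec_find_max_fives grades out) := by unfold Spec_find_max_fives; infer_instance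

-- ===== CLAIM (what is proved, stated in full; the proofs are below) =====
def Claim_equal_find_max_fives : Prop := ∀ (grades : List Int), Dom_find_max_fives grades → Spec_find_max_fives grades (find_max_fives grades)

-- ===== LEMMAS AND PROOFS =====

theorem lastReset_append (l : List Int) (x : Int) :
    lastReset (l ++ [x]) = if x = 2 ∨ x = 3 then (l.length : Int) else lastReset l := by
  simp [lastReset, List.zipIdx_append, List.foldl_append]

theorem lastReset_bounds (l : List Int) : -1 ≤ lastReset l ∧ lastReset l < l.length := by
  induction l using List.reverseRecOn with
  | nil => simp [lastReset]
  | append_singleton l x ih =>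
      rw [lastReset_append]
      have hlen : (l ++ [x]).length = l.length + 1 := by simp
      rw [hlen]
      obtain ⟨h1, h2⟩ := ih
      split_ifs with h <;> push_cast <;> omega

theorem find_max_fives_append (l : List Int) (x : Int) :
    find_max_fives (l ++ [x]) =
      if x = 5 then find_max_fives l + 1
      else if x = 2 ∨ x = 3 then 0
      else find_max_fives l := by
  unfold find_max_fives
  have hlen : (l ++ [x]).length = l.length + 1 := by simp
  rw [hlen, List.range_succ, List.foldl_append]
  have hx : (l ++ [x]).getD l.length 0 = x := by
    simp [List.getD]
  rw [PySem.List.foldl_congr_mem (List.range l.length)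
      (fun (st : Int × Int) (i : Nat) =>
        if (l ++ [x]).getD i 0 = 5 then (st.1 + 1, st.2)
        else if (l ++ [x]).getD i 0 = 2 ∨ (l ++ [x]).getD i 0 = 3 then (0, (i : Int) + 1)
        else st)
      (fun (st : Int × Int) (i : Nat) =>
        if l.getD i 0 = 5 then (st.1 + 1, st.2)
        else if l.getD i 0 = 2 ∨ l.getD i 0 = 3 then (0, (i : Int) + 1)
        else st)
      ((0 : Int), (0 : Int))
      (by
        intro st i hi
        have hi' : i < l.length := List.mem_range.mp hi
        simp [List.getD, List.getElem?_append_left hi']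
        rfl)]
  simp only [List.foldl_cons, List.foldl_nil, hx]
  split_ifs <;> rfl

theorem find_max_fives_alt_append (l : List Int) (x : Int) :
    find_max_fives_alt (l ++ [x]) =
      if x = 5 then find_max_fives_alt l + 1
      else if x = 2 ∨ x = 3 then 0
      else find_max_fives_alt l := by
  unfold find_max_fives_alt
  rw [lastReset_append]
  by_cases h23 : x = 2 ∨ x = 3
  · have hx5 : ¬ x = 5 := by rcases h23 with h | h <;> omega
    rw [if_pos h23, if_neg hx5, if_pos h23]
    have ht : ((l.length : Int) + 1).toNat = l.length + 1 := by omega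
    rw [ht]
    have hd : (l ++ [x]).drop (l.length + 1) = [] := by
      apply List.drop_of_length_le
      simp
    rw [hd]
    rfl
  · rw [if_neg h23]
    obtain ⟨hlb, hub⟩ := lastReset_bounds l
    have hle : (lastReset l + 1).toNat ≤ l.length := by omega
    rw [List.drop_append_of_le_length hle, List.countP_append]
    by_cases h5 : x = 5
    · rw [if_pos h5]
      simp [h5]
    · rw [if_neg h5]
      have hc : List.countP (fun g => g == 5) [x] = 0 := by
        simp [h5]
      rw [hc]
      simp
      intro h
      exact absurd h h23

theorem find_max_fives_eq_alt (l : List Int) : find_max_fives l = find_max_fives_alt l := by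
  induction l using List.reverseRecOn with
  | nil => rfl
  | append_singleton l x ih =>
      rw [find_max_fives_append, find_max_fives_alt_append, ih]

-- ===== VERDICT (by name: the statement is the Claim_ definition above) =====
theorem find_max_fives_spec : Claim_equal_find_max_fives := by
  intro grades _
  unfold Spec_find_max_fives
  exact find_max_fives_eq_alt grades
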